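-- pv_equiv track=rewrite | github.com/Jiw00n/vae-extent-search | scripts/pre_experiments/model_myself/vae_extent_search.py | add_specific_configs
-- ===== SOURCE A (Python) =====
-- import itertools
--
-- def add_specific_configs(to_measure_configs, specific_configs, sampling_hyper):
--     # 특정 설정 추가
--     # 특정 설정 이외에 다른 하이퍼파라미터는 전체 조합으로
--     for spec in specific_configs:
--         key1, val1, key2, val2 = spec
--         other_keys = [k for k in sampling_hyper.keys() if k != key1 and k != key2]
--         for other_params in itertools.product(*[sampling_hyper[k] for k in other_keys]):
--             hyper_config = {key1: val1, key2: val2}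
--             hyper_config.update(dict(zip(other_keys, other_params)))
--             to_measure_configs.append(hyper_config)
--     return to_measure_configs
-- ===== SOURCE B (Python) =====
-- def add_specific_configs(to_measure_configs, specific_configs, sampling_hyper):
--     # Mixed-radix counting: combination number i is decoded into per-key digits
--     # with divmod (last key least significant), so no itertools.product and no
--     # expansion of partial results.  Mutates and returns to_measure_configs.
--     for key1, val1, key2, val2 in specific_configs:
--         other_keys = [k for k in sampling_hyper if k != key1 and k != key2]
--         sizes = [len(sampling_hyper[k]) for k in other_keys]
--         total = 1
--         for s in sizes:
--             total *= s
--         for i in range(total):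
--             digits = []
--             rem = i
--             for s in reversed(sizes):
--                 rem, d = divmod(rem, s)
--                 digits.append(d)
--             digits.reverse()
--             cfg = {key1: val1, key2: val2}
--             for k, d in zip(other_keys, digits):
--                 cfg[k] = sampling_hyper[k][d]
--             to_measure_configs.append(cfg)
--     return to_measure_configs
-- ===== Notes on version B (the rewrite author's own statement) =====
-- stated objective: alternative
-- what changed: B replaces itertools.product plus dict(zip(...)) with mixed-radix counting: it numbers the combinations 0..total-1 and decodes each number into per-key indices with divmod (last key least significant), indexing each value list directly.
import Mathlib
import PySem

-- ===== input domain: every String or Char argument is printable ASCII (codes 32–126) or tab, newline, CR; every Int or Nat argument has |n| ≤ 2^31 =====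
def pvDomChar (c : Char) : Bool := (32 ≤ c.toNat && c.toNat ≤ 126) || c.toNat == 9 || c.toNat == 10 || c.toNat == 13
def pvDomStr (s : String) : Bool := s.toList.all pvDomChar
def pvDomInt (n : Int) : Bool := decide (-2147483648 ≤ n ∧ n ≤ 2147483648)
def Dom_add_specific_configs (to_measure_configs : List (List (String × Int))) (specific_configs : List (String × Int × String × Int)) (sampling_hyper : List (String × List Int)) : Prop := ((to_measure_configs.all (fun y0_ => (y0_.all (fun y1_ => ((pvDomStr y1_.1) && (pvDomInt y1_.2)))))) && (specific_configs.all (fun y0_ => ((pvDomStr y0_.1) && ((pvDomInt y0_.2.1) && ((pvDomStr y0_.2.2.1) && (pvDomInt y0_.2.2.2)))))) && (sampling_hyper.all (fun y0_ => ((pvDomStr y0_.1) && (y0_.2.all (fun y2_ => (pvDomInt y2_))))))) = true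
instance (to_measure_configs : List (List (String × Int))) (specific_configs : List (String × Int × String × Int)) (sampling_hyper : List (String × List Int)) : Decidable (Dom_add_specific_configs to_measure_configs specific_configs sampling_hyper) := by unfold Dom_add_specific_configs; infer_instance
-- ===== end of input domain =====

-- B enumerates each spec's combinations by mixed-radix counting (decoding the
-- combination number into per-key digits with divmod) instead of
-- itertools.product; same return value, and in Python the same in-place
-- mutation of to_measure_configs — objective: alternative.

-- ===== PORT A =====
-- itertools.product(*lists), rightmost factor varies fastest
def pvProduct (ls : List (List Int)) : List (List Int) :=
  match ls with
  | [] => [[]]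
  | xs :: rest => xs.flatMap (fun x => (pvProduct rest).map (fun t => x :: t))

def add_specific_configs (to_measure_configs : List (List (String × Int))) (specific_configs : List (String × Int × String × Int)) (sampling_hyper : List (String × List Int)) : List (List (String × Int)) :=
  let d := PySem.Dict.ofList sampling_hyper
  specific_configs.foldl (fun acc spec =>
    let key1 := spec.1; let val1 := spec.2.1; let key2 := spec.2.2.1; let val2 := spec.2.2.2
    let other_keys := d.keys.filter (fun k => !(k == key1) && !(k == key2))
    -- sampling_hyper[k] : k is always one of the dict's keys here, so getD [] is exact
    (pvProduct (other_keys.map (fun k => d.getD k []))).foldl (fun acc2 t =>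
      let hc := (PySem.Dict.empty.insert key1 val1).insert key2 val2
      let hc := (other_keys.zip t).foldl (fun h p => h.insert p.1 p.2) hc
      acc2 ++ [hc.items]) acc) to_measure_configs

-- ===== PORT B =====
-- the digits loop: rem, d = divmod(rem, s) over reversed(sizes), digits appended then reversed
def pvDecode (sizes : List Int) (i : Int) : List Int :=
  ((sizes.reverse).foldl
    (fun (st : Int × List Int) s =>
      (PySem.Int.floordiv st.1 s, st.2 ++ [PySem.Int.mod st.1 s])) (i, ([] : List Int))).2.reverse

def add_specific_configs_alt (to_measure_configs : List (List (String × Int))) (specific_configs : List (String × Int × String × Int)) (sampling_hyper : List (String × List Int)) : List (List (String × Int)) :=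
  let d := PySem.Dict.ofList sampling_hyper
  specific_configs.foldl (fun acc spec =>
    let key1 := spec.1; let val1 := spec.2.1; let key2 := spec.2.2.1; let val2 := spec.2.2.2
    let other_keys := d.keys.filter (fun k => !(k == key1) && !(k == key2))
    let sizes := other_keys.map (fun k => ((d.getD k []).length : Int))
    let total := sizes.foldl (· * ·) 1
    (PySem.List.pyRange 0 total 1).foldl (fun acc2 i =>
      let digits := pvDecode sizes i
      let cfg := (PySem.Dict.empty.insert key1 val1).insert key2 val2
      -- sampling_hyper[k][d] : the decoded digit is always a valid index, so pyGetD 0 is exact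
      let cfg := (other_keys.zip digits).foldl
        (fun h p => h.insert p.1 (PySem.List.pyGetD (d.getD p.1 []) p.2 0)) cfg
      acc2 ++ [cfg.items]) acc) to_measure_configs

-- ===== PRECONDITION & SPEC =====
def Spec_add_specific_configs (to_measure_configs : List (List (String × Int))) (specific_configs : List (String × Int × String × Int)) (sampling_hyper : List (String × List Int)) (out : List (List (String × Int))) : Prop := out = add_specific_configs_alt to_measure_configs specific_configs sampling_hyper
instance (to_measure_configs : List (List (String × Int))) (specific_configs : List (String × Int × String × Int)) (sampling_hyper : List (String × List Int)) (out : List (List (String × Int))) : Decidable (Spec_add_specific_configs to_measure_configs specific_configs sampling_hyper out) := by unfold Spec_add_specific_configs; infer_instance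

-- ===== CLAIM =====
def Claim_equal_add_specific_configs : Prop := ∀ (to_measure_configs : List (List (String × Int))) (specific_configs : List (String × Int × String × Int)) (sampling_hyper : List (String × List Int)), Dom_add_specific_configs to_measure_configs specific_configs sampling_hyper → Spec_add_specific_configs to_measure_configs specific_configs sampling_hyper (add_specific_configs to_measure_configs specific_configs sampling_hyper)

-- ===== LEMMAS AND PROOFS =====

-- the state accumulated by the divmod loop splits into prefix ++ fresh run
theorem pvDecode_state_split :
    ∀ (l : List Int) (r : Int) (acc : List Int),
      l.foldl (fun (st : Int × List Int) s =>
          (PySem.Int.floordiv st.1 s, st.2 ++ [PySem.Int.mod st.1 s])) (r, acc)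
        = ((l.foldl (fun (st : Int × List Int) s =>
              (PySem.Int.floordiv st.1 s, st.2 ++ [PySem.Int.mod st.1 s])) (r, [])).1,
           acc ++ (l.foldl (fun (st : Int × List Int) s =>
              (PySem.Int.floordiv st.1 s, st.2 ++ [PySem.Int.mod st.1 s])) (r, [])).2) := by
  intro l
  induction l with
  | nil => intro r acc; simp
  | cons s rest ih =>
    intro r acc
    simp only [List.foldl_cons, List.nil_append]
    rw [ih _ (acc ++ [PySem.Int.mod r s]), ih _ [PySem.Int.mod r s]]
    simp

theorem pvDecode_append (sizes : List Int) (n i : Int) :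
    pvDecode (sizes ++ [n]) i
      = pvDecode sizes (PySem.Int.floordiv i n) ++ [PySem.Int.mod i n] := by
  unfold pvDecode
  rw [List.reverse_append]
  simp only [List.reverse_cons, List.reverse_nil, List.nil_append, List.singleton_append,
    List.foldl_cons]
  rw [pvDecode_state_split _ _ [PySem.Int.mod i n]]
  simp

theorem pvDecode_length : ∀ (sizes : List Int) (i : Int),
    (pvDecode sizes i).length = sizes.length := by
  intro sizes
  induction sizes using List.reverseRecOn with
  | nil => intro i; rfl
  | append_singleton rest n ih =>
    intro i
    rw [pvDecode_append]
    simp [ih]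

theorem pvFlatMapSingleton (xs : List Int) :
    xs.flatMap (fun x => [[x]]) = xs.map (fun x => [x]) := by
  induction xs with
  | nil => rfl
  | cons y ys ih => simp only [List.flatMap_cons, List.map_cons, List.singleton_append, ih]

theorem pvProduct_append (xs : List Int) :
    ∀ (ls : List (List Int)),
      pvProduct (ls ++ [xs])
        = (pvProduct ls).flatMap (fun t => xs.map (fun x => t ++ [x])) := by
  intro ls
  induction ls with
  | nil => simp [pvProduct, pvFlatMapSingleton]
  | cons ys rest ih =>
    simp only [List.cons_append, pvProduct, ih]
    simp [List.flatMap_map, List.flatMap_assoc, List.map_flatMap, List.map_map, Function.comp_def]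

-- total = product of the sizes
theorem pvTotal_eq (ls : List (List Int)) :
    (ls.map (fun xs => (xs.length : Int))).foldl (· * ·) 1
      = ((ls.map List.length).prod : Int) := by
  induction ls using List.reverseRecOn with
  | nil => rfl
  | append_singleton rest n ih =>
    simp only [List.map_append, List.foldl_append, List.foldl_cons, List.foldl_nil,
      List.map_cons, List.map_nil, ih]
    rw [List.prod_append, List.prod_singleton, Nat.cast_mul]

-- range(T*n) enumerated as q*n + r, rightmost fastest
theorem pyRange_mul_split (n : Int) (hn : 0 < n) :
    ∀ (t : Nat),
      PySem.List.pyRange 0 ((t : Int) * n) 1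
        = (PySem.List.pyRange 0 (t : Int) 1).flatMap
            (fun q => (PySem.List.pyRange 0 n 1).map (fun r => q * n + r)) := by
  intro t
  induction t with
  | zero => simp [PySem.List.pyRange_one_eq_nil]
  | succ t ih =>
    have h1 : ((t + 1 : Nat) : Int) * n = (t : Int) * n + n := by push_cast; ring
    have h2 : ((t + 1 : Nat) : Int) = (t : Int) + 1 := by push_cast; ring
    rw [h1, h2]
    rw [PySem.List.pyRange_one_append 0 ((t : Int) * n) ((t : Int) * n + n)
      (by positivity) (by omega)]
    rw [PySem.List.pyRange_one_succ_right (by positivity)]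
    rw [List.flatMap_append, ih]
    congr 1
    simp only [List.flatMap_cons, List.flatMap_nil, List.append_nil]
    rw [PySem.List.pyRange_one (((t : Int)) * n) ((t : Int) * n + n),
        PySem.List.pyRange_one 0 n]
    simp [List.map_map, Function.comp_def]

theorem decode_digit (q r n : Int) (hr0 : 0 ≤ r) (hrn : r < n) :
    PySem.Int.floordiv (q * n + r) n = q ∧ PySem.Int.mod (q * n + r) n = r := by
  have hn : 0 < n := by omega
  rw [PySem.Int.floordiv_eq_ediv_of_pos hn, PySem.Int.mod_eq_emod_of_pos hn]
  constructor
  · rw [add_comm, Int.add_mul_ediv_right r q (by omega)]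
    rw [Int.ediv_eq_zero_of_lt hr0 hrn]
    ring
  · rw [add_comm, Int.add_mul_emod_self_right]
    exact Int.emod_eq_of_lt hr0 hrn

-- the tuple of values selected by the decoded digits
def pvTuple (ls : List (List Int)) (i : Int) : List Int :=
  List.zipWith (fun xs dd => PySem.List.pyGetD xs dd 0) ls
    (pvDecode (ls.map (fun xs => (xs.length : Int))) i)

-- MAIN: decoding every i in range(total) enumerates exactly itertools.product
theorem range_decode_eq_product : ∀ (ls : List (List Int)),
    (PySem.List.pyRange 0 ((ls.map (fun xs => (xs.length : Int))).foldl (· * ·) 1) 1).map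
        (pvTuple ls)
      = pvProduct ls := by
  intro ls
  induction ls using List.reverseRecOn with
  | nil =>
    simp [pvProduct, pvTuple, PySem.List.pyRange]
  | append_singleton rest xs ih =>
    rw [pvTotal_eq, pvProduct_append]
    by_cases hx : xs.length = 0
    · have hxe : xs = [] := List.eq_nil_of_length_eq_zero hx
      subst hxe
      simp [PySem.List.pyRange_one_eq_nil]
    · have hc : ((((rest ++ [xs]).map List.length).prod : Nat) : Int)
          = (((rest.map List.length).prod : Nat) : Int) * (xs.length : Int) := by
        rw [List.map_append, List.prod_append, List.map_singleton, List.prod_singleton,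
          Nat.cast_mul]
      rw [hc]
      rw [pyRange_mul_split ((xs.length : Int)) (by exact_mod_cast Nat.pos_of_ne_zero hx)
        ((rest.map List.length).prod)]
      rw [← pvTotal_eq, ← ih, List.flatMap_map, List.map_flatMap]
      congr 1
      funext q
      simp only [Function.comp_def, List.map_map]
      have hq : ∀ r : Int, 0 ≤ r → r < (xs.length : Int) →
          pvTuple (rest ++ [xs]) (q * (xs.length : Int) + r)
            = pvTuple rest q ++ [PySem.List.pyGetD xs r 0] := by
        intro r h0 h1
        unfold pvTuple
        rw [List.map_append]
        simp only [List.map_cons, List.map_nil]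
        rw [pvDecode_append]
        obtain ⟨hd, hm⟩ := decode_digit q r (xs.length : Int) h0 h1
        rw [hd, hm]
        rw [List.zipWith_append (by rw [pvDecode_length]; simp)]
        simp
      have : ((PySem.List.pyRange 0 (xs.length : Int) 1).map
            (fun r => pvTuple (rest ++ [xs]) (q * (xs.length : Int) + r)))
          = (PySem.List.pyRange 0 (xs.length : Int) 1).map
            (fun r => pvTuple rest q ++ [PySem.List.pyGetD xs r 0]) := by
        apply List.map_congr_left
        intro r hr
        rw [PySem.List.mem_pyRange_one] at hr
        exact hq r hr.1 hr.2
      rw [this]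
      have hsel : (PySem.List.pyRange 0 (xs.length : Int) 1).map
            (fun r => PySem.List.pyGetD xs r 0) = xs := by
        exact PySem.List.map_pyGetD_pyRange_zero' xs 0
      calc (PySem.List.pyRange 0 (xs.length : Int) 1).map
              (fun r => pvTuple rest q ++ [PySem.List.pyGetD xs r 0])
          = ((PySem.List.pyRange 0 (xs.length : Int) 1).map
              (fun r => PySem.List.pyGetD xs r 0)).map
              (fun x => pvTuple rest q ++ [x]) := by
            rw [List.map_map]; rfl
        _ = xs.map (fun x => pvTuple rest q ++ [x]) := by rw [hsel]

-- inserting looked-up values digit by digit = inserting the value tuple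
theorem zip_insert_lookup (lookup : String → List Int) :
    ∀ (ks : List String) (ds : List Int) (base : PySem.Dict String Int),
      (ks.zip ds).foldl
          (fun h p => h.insert p.1 (PySem.List.pyGetD (lookup p.1) p.2 0)) base
        = (ks.zip (List.zipWith (fun xs dd => PySem.List.pyGetD xs dd 0)
              (ks.map lookup) ds)).foldl (fun h p => h.insert p.1 p.2) base := by
  intro ks
  induction ks with
  | nil => intro ds base; rfl
  | cons k rest ih =>
    intro ds base
    cases ds with
    | nil => rfl
    | cons d dsr =>
      simp only [List.zip_cons_cons, List.map_cons, List.zipWith_cons_cons, List.foldl_cons]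
      exact ih dsr _

-- ===== VERDICT (by name: the statement is the Claim_ definition above) =====
theorem add_specific_configs_spec : Claim_equal_add_specific_configs := by
  intro tmc sc sh _
  unfold Spec_add_specific_configs add_specific_configs add_specific_configs_alt
  simp only []
  congr 1
  funext acc spec
  rw [PySem.List.foldl_append_singleton_eq_map, PySem.List.foldl_append_singleton_eq_map]
  congr 1
  set d := PySem.Dict.ofList sh with hd
  set ks := d.keys.filter (fun k => !(k == spec.1) && !(k == spec.2.2.1)) with hks
  set base := (PySem.Dict.empty.insert spec.1 spec.2.1).insert spec.2.2.1 spec.2.2.2 with hbase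
  have hsz : ks.map (fun k => ((d.getD k []).length : Int))
      = (ks.map (fun k => d.getD k [])).map (fun xs => (xs.length : Int)) := by
    rw [List.map_map]; rfl
  rw [hsz]
  rw [← range_decode_eq_product (ks.map (fun k => d.getD k []))]
  rw [List.map_map]
  apply List.map_congr_left
  intro i _
  simp only [Function.comp_def]
  rw [zip_insert_lookup (fun k => d.getD k [])]
  unfold pvTuple
  rw [List.map_map]
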